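-- pv_equiv track=rewrite | github.com/rodrigodub/austin | Read Auto-GPT outputs.py | split_recursively
-- ===== SOURCE A (Python) =====
-- def split_recursively(full_text: str, keywords: list):
--     """
--     Recursively splits a full text into parts based on the keywords.
--
--     Args:
--         full_text (str): The full text to split.
--         keywords (list): List of keywords to search for.
--
--     Returns:
--         list: A list containing all the parts after splitting.
--     """
--     # 1 Take the full text
--     parts = []
--
--     # 2 Take all the words in keywords and find the smallest index of them, greater than zero
--     smallest_index = len(full_text)
--     for keyword in keywords:
--         index = full_text.find(keyword)
--         if index > 0 and index < smallest_index:
--             smallest_index = index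
--
--     # 3 Split the full text into two parts, separated by the index
--     part1 = full_text[:smallest_index]
--     part2 = full_text[smallest_index:]
--
--     # 4 Store the first part in a list and recursively do the same process with the second part
--     parts.append(part1)
--     if len(part2) > 0:
--         parts.extend(split_recursively(part2, keywords))
--
--     # 5 Return a list with all the parts
--     return parts
-- ===== SOURCE B (Python) =====
-- def split_recursively(full_text: str, keywords: list):
--     """Single pass: collect every occurrence position of each keyword once,
--     then walk the text left-to-right with one pointer per keyword."""
--     n = len(full_text)
--     occ = []
--     for kw in keywords:
--         positions = []
--         p = full_text.find(kw)
--         while p != -1: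
--             positions.append(p)
--             p = full_text.find(kw, p + 1)
--         occ.append(positions)
--     ptr = [0] * len(occ)
--     parts = []
--     i = 0
--     while True:
--         cut = n
--         for j in range(len(occ)):
--             positions = occ[j]
--             k = ptr[j]
--             while k < len(positions) and positions[k] < i:
--                 k += 1
--             ptr[j] = k
--             if k < len(positions) and i < positions[k] < cut:
--                 cut = positions[k]
--         parts.append(full_text[i:cut])
--         if cut >= n:
--             return parts
--         i = cut
-- ===== Notes on version B (the rewrite author's own statement) =====
-- stated objective: faster
-- what changed: A re-scans the whole remaining suffix with str.find for every keyword at every split (recursing once per part); B collects each keyword's occurrence positions once up front and then walks the text left-to-right in a single loop with one monotone pointer per keyword.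
import Mathlib
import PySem

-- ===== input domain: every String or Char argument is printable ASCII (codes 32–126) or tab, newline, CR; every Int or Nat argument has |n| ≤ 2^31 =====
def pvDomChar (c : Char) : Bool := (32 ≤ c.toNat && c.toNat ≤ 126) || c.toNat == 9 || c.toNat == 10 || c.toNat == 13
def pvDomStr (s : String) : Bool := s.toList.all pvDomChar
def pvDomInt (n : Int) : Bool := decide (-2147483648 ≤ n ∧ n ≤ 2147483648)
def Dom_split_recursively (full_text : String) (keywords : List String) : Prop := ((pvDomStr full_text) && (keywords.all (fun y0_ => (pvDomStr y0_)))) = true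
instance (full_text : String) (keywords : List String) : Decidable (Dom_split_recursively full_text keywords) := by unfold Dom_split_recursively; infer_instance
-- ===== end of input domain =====

-- B replaces A's quadratic recursion (a fresh str.find over the whole suffix at every split)
-- by collecting each keyword's occurrence positions once and walking the text left-to-right
-- with one monotone pointer per keyword; objective: faster (asymptotic).

-- ===== PORT A =====
-- A's "for keyword in keywords" loop computing the smallest positive first-occurrence index
def pvFindSmallest (s : List Char) (kws : List (List Char)) : Int :=
  kws.foldl (fun smallest_index keyword =>
    let index := PySem.Chars.find s keyword
    if 0 < index ∧ index < smallest_index then index else smallest_index)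
    (s.length : Int)

-- the fold keeps its accumulator or replaces it by a strictly positive index (termination of A)
lemma pvFindSmallest_fold_pos (t : List Char) (kws : List (List Char)) (c : Int) :
    0 < kws.foldl (fun sm kw =>
        let idx := PySem.Chars.find t kw
        if 0 < idx ∧ idx < sm then idx else sm) c
      ∨ kws.foldl (fun sm kw =>
        let idx := PySem.Chars.find t kw
        if 0 < idx ∧ idx < sm then idx else sm) c = c := by
  induction kws generalizing c with
  | nil => right; rfl
  | cons kw rest ih =>
    simp only [List.foldl_cons]
    split_ifs with h
    · rcases ih (PySem.Chars.find t kw) with h1 | h1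
      · left; exact h1
      · left; rw [h1]; exact h.1
    · exact ih c

lemma pvFindSmallest_pos (s : List Char) (kws : List (List Char)) :
    0 < pvFindSmallest s kws ∨ pvFindSmallest s kws = (s.length : Int) :=
  pvFindSmallest_fold_pos s kws (s.length : Int)

def splitRecChars (s : List Char) (kws : List (List Char)) : List (List Char) :=
  let smallest_index := pvFindSmallest s kws
  let part1 := PySem.List.slice s none (some smallest_index)
  let part2 := PySem.List.slice s (some smallest_index) none
  part1 :: (if 0 < part2.length then splitRecChars part2 kws else [])
termination_by s.length
decreasing_by
  rename_i h
  simp only [part2, smallest_index] at h ⊢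
  rcases pvFindSmallest_pos s kws with hp | hp
  · rw [PySem.List.slice_from s (le_of_lt hp)] at h ⊢
    simp only [List.length_drop] at h ⊢
    omega
  · rw [hp, PySem.List.slice_from s (by exact_mod_cast Int.natCast_nonneg s.length)] at h
    simp at h

def split_recursively (full_text : String) (keywords : List String) : List String :=
  (splitRecChars full_text.toList (keywords.map String.toList)).map String.ofList

-- ===== PORT B =====
-- full_text.find(kw, start) with start past the end yields -1 (needed for termination of the find loop)
lemma pvFindFrom_gt (s kw : List Char) (start : Nat) (h : s.length < start) :
    PySem.Chars.findFrom s kw (start : Int) none = -1 := by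
  simp only [PySem.Chars.findFrom]
  have h1 : ¬ ((start : Int) < 0) := by omega
  simp only [h1, if_false]
  rw [if_pos (by exact_mod_cast h)]

lemma pvFindFrom_ge (s kw : List Char) (start : Nat)
    (h : PySem.Chars.findFrom s kw (start : Int) none ≠ -1) :
    start ≤ (PySem.Chars.findFrom s kw (start : Int) none).toNat ∧ start ≤ s.length := by
  have hsl : start ≤ s.length := by
    by_contra hc
    exact h (pvFindFrom_gt s kw start (by omega))
  have := (PySem.Chars.findFrom_natCast_spec s kw start hsl h).1
  omega

-- Source B's "p = full_text.find(kw); while p != -1: positions.append(p); p = full_text.find(kw, p+1)"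
def pvFindAll (s kw : List Char) (start : Nat) : List Nat :=
  if h : PySem.Chars.findFrom s kw (start : Int) none = -1 then []
  else (PySem.Chars.findFrom s kw (start : Int) none).toNat ::
    pvFindAll s kw ((PySem.Chars.findFrom s kw (start : Int) none).toNat + 1)
termination_by s.length + 1 - start
decreasing_by
  have := pvFindFrom_ge s kw start h
  omega

-- Source B's "while k < len(positions) and positions[k] < i: k += 1"
def pvAdvance (positions : List Nat) (i k : Nat) : Nat :=
  if h : k < positions.length then
    if positions[k] < i then pvAdvance positions i (k + 1) else k
  else k
termination_by positions.length - k

-- Source B's "for j in range(len(occ)): ..." body: advance the pointer, maybe lower the cut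
def pvStep (i : Nat) (pairs : List (List Nat × Nat)) (cut : Nat) : List Nat × Nat :=
  match pairs with
  | [] => ([], cut)
  | (positions, k0) :: rest =>
    let k := pvAdvance positions i k0
    let cut' := if h : k < positions.length then
        (if i < positions[k] ∧ positions[k] < cut then positions[k] else cut)
      else cut
    let r := pvStep i rest cut'
    (k :: r.1, r.2)

-- the cut only ever moves to a position strictly right of i (termination of the main loop)
lemma pvStep_cut_lb (i : Nat) (pairs : List (List Nat × Nat)) (c : Nat) :
    (pvStep i pairs c).2 = c ∨ i < (pvStep i pairs c).2 := by
  induction pairs generalizing c with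
  | nil => left; rfl
  | cons p rest ih =>
    obtain ⟨positions, k0⟩ := p
    simp only [pvStep]
    split_ifs with h1 h2
    · rcases ih positions[pvAdvance positions i k0] with h | h
      · right; rw [h]; exact h2.1
      · right; exact h
    · exact ih c
    · exact ih c

-- Source B's "while True" main loop over the cut positions
def pvLoop (s : List Char) (occ : List (List Nat)) (ptrs : List Nat) (i : Nat) :
    List (List Char) :=
  let r := pvStep i (occ.zip ptrs) s.length
  PySem.List.slice s (some (i : Int)) (some (r.2 : Int)) ::
    (if s.length ≤ r.2 then [] else pvLoop s occ r.1 r.2)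
termination_by s.length - i
decreasing_by
  rename_i h
  simp only [r] at h ⊢
  rcases pvStep_cut_lb i (occ.zip ptrs) s.length with h1 | h1
  · omega
  · omega

def split_recursively_alt (full_text : String) (keywords : List String) : List String :=
  let s := full_text.toList
  let occ := keywords.map (fun kw => pvFindAll s kw.toList 0)
  (pvLoop s occ (List.replicate occ.length 0) 0).map String.ofList

-- ===== PRECONDITION & SPEC =====
def Spec_split_recursively (full_text : String) (keywords : List String) (out : List String) : Prop := out = split_recursively_alt full_text keywords
instance (full_text : String) (keywords : List String) (out : List String) : Decidable (Spec_split_recursively full_text keywords out) := by unfold Spec_split_recursively; infer_instance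

-- ===== CLAIM (what is proved, stated in full; the proofs are below) =====
def Claim_equal_split_recursively : Prop := ∀ (full_text : String) (keywords : List String), Dom_split_recursively full_text keywords → Spec_split_recursively full_text keywords (split_recursively full_text keywords)

-- ===== LEMMAS AND PROOFS =====

-- the ascending list of ALL positions where kw occurs in s (0..len inclusive, for kw = "")
def pvOcc (s kw : List Char) : List Nat :=
  (List.range (s.length + 1)).filter (fun p => kw.isPrefixOf (s.drop p))

lemma pvOcc_sorted (s kw : List Char) : (pvOcc s kw).Pairwise (· < ·) :=
  List.pairwise_lt_range.filter _

lemma pvOcc_mem (s kw : List Char) (p : Nat) :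
    p ∈ pvOcc s kw ↔ p ≤ s.length ∧ kw <+: s.drop p := by
  simp [pvOcc, List.mem_filter, List.mem_range, List.isPrefixOf_iff_prefix]

-- peeling the first passing element off a filtered range
lemma pvFilter_range_cons (n p0 : Nat) (P : Nat → Bool) (h0 : p0 < n) (hP : P p0 = true)
    (hlow : ∀ q < p0, P q = false) :
    (List.range n).filter P
      = p0 :: (List.range n).filter (fun q => decide (p0 < q) && P q) := by
  have hn : n = (p0 + 1) + (n - (p0 + 1)) := by omega
  rw [hn, List.range_add, List.filter_append, List.filter_append, List.range_succ,
    List.filter_append, List.filter_append]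
  have h1 : (List.range p0).filter P = [] := by
    rw [List.filter_eq_nil_iff]
    intro q hq
    rw [List.mem_range] at hq
    simp [hlow q hq]
  have h1' : (List.range p0).filter (fun q => decide (p0 < q) && P q) = [] := by
    rw [List.filter_eq_nil_iff]
    intro q hq
    rw [List.mem_range] at hq
    intro hc
    rw [Bool.and_eq_true, decide_eq_true_eq] at hc
    omega
  have h2 : [p0].filter P = [p0] := by simp [hP]
  have h2' : [p0].filter (fun q => decide (p0 < q) && P q) = [] := by simp
  have h3 : ((List.range (n - (p0 + 1))).map (fun x => p0 + 1 + x)).filter P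
      = ((List.range (n - (p0 + 1))).map (fun x => p0 + 1 + x)).filter
          (fun q => decide (p0 < q) && P q) := by
    apply List.filter_congr
    intro q hq
    rcases List.mem_map.mp hq with ⟨x, _, rfl⟩
    have : p0 < p0 + 1 + x := by omega
    simp [this]
  rw [h1, h1', h2, h2', h3]
  simp

-- pvFindAll computes exactly the occurrences ≥ start
lemma pvFindAll_eq (s kw : List Char) (start : Nat) :
    pvFindAll s kw start
      = (List.range (s.length + 1)).filter (fun p => decide (start ≤ p) && kw.isPrefixOf (s.drop p)) := by
  generalize hm : s.length + 1 - start = m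
  induction m using Nat.strong_induction_on generalizing start with
  | _ m ih =>
  by_cases hsl : start ≤ s.length
  case neg =>
    -- start > len: find loop returns nothing and no position qualifies
    rw [pvFindAll, dif_pos (pvFindFrom_gt s kw start (by omega))]
    rw [eq_comm, List.filter_eq_nil_iff]
    intro p hp
    rw [List.mem_range] at hp
    simp only [Bool.and_eq_true, decide_eq_true_eq, not_and]
    intro hsp
    omega
  case pos =>
    rw [pvFindAll]
    by_cases h : PySem.Chars.findFrom s kw (start : Int) none = -1
    · rw [dif_pos h]
      have hninf : ¬ kw <:+: s.drop start :=
        (PySem.Chars.findFrom_natCast_eq_neg_one_iff s kw start hsl).mp h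
      rw [eq_comm, List.filter_eq_nil_iff]
      intro p hp
      rw [List.mem_range] at hp
      simp only [Bool.and_eq_true, decide_eq_true_eq, not_and]
      intro hsp hpre
      apply hninf
      rw [← PySem.Chars.isIn_iff_infix, ← PySem.Chars.exists_prefix_drop_iff_isIn]
      refine ⟨p - start, ?_⟩
      rw [List.drop_drop]
      have he : start + (p - start) = p := by omega
      rw [he]
      exact List.isPrefixOf_iff_prefix.mp hpre
    · rw [dif_neg h]
      obtain ⟨hge, hpre, hmin⟩ := PySem.Chars.findFrom_natCast_spec s kw start hsl h
      set p : Int := PySem.Chars.findFrom s kw (start : Int) none with hpdef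
      have hple : p.toNat ≤ s.length := by
        have hfr := PySem.Chars.findFrom_natCast s kw start hsl
        rw [← hpdef] at hfr
        have hfind : PySem.Chars.find (s.drop start) kw ≤ ((s.drop start).length : Int) :=
          PySem.Chars.find_le_length _ _
        rw [List.length_drop] at hfind
        by_cases hf1 : PySem.Chars.find (s.drop start) kw = -1
        · rw [if_pos hf1] at hfr; exact absurd hfr h
        · rw [if_neg hf1] at hfr
          omega
      have hp0 : p.toNat < s.length + 1 := by omega
      rw [pvFilter_range_cons (s.length + 1) p.toNat _ hp0
        (by simp only [Bool.and_eq_true, decide_eq_true_eq]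
            exact ⟨by omega, List.isPrefixOf_iff_prefix.mpr hpre⟩)
        (by intro q hq
            rw [Bool.eq_false_iff]
            intro hc
            rw [Bool.and_eq_true, decide_eq_true_eq] at hc
            by_cases hsq : start ≤ q
            · exact hmin q hsq hq (List.isPrefixOf_iff_prefix.mp hc.2)
            · exact hsq hc.1)]
      rw [ih (s.length + 1 - (p.toNat + 1)) (by omega) (p.toNat + 1) rfl]
      congr 1
      apply List.filter_congr
      intro q hq
      by_cases h1 : p.toNat + 1 ≤ q
      · have h2 : p.toNat < q := by omega
        have h3 : start ≤ q := by omega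
        simp [h1, h2, h3]
      · have h2 : ¬ p.toNat < q := by omega
        simp [h1, h2]

lemma pvFindAll_zero (s kw : List Char) : pvFindAll s kw 0 = pvOcc s kw := by
  rw [pvFindAll_eq]
  simp [pvOcc]

-- in a strictly sorted list, countP (< i) separates the small elements from the rest
lemma pvSorted_countP_lt (l : List Nat) (hs : l.Pairwise (· < ·)) (i : Nat) (j : Nat)
    (hj : j < l.length) : j < l.countP (· < i) ↔ l[j] < i := by
  induction l generalizing j with
  | nil => simp at hj
  | cons a t ih =>
    rw [List.pairwise_cons] at hs
    by_cases ha : a < i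
    · rw [List.countP_cons_of_pos (by simpa using ha)]
      cases j with
      | zero => simpa using ha
      | succ j =>
        simp only [List.getElem_cons_succ]
        rw [Nat.succ_lt_succ_iff]
        exact ih hs.2 j (by simpa using hj)
    · have hz : List.countP (fun x => decide (x < i)) (a :: t) = 0 := by
        rw [List.countP_eq_zero]
        intro x hx
        rcases List.mem_cons.mp hx with rfl | hx
        · simpa using ha
        · have := hs.1 x hx
          simp only [decide_eq_true_eq]
          omega
      rw [hz]
      simp only [Nat.not_lt_zero, false_iff, not_lt]
      cases j with
      | zero => simpa using ha
      | succ j =>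
        have hjt : j < t.length := by simpa using hj
        have : a < t[j] := hs.1 _ (List.getElem_mem hjt)
        simp only [List.getElem_cons_succ]
        omega

-- the pointer advance lands exactly on the count of elements < i
lemma pvAdvance_eq (l : List Nat) (hs : l.Pairwise (· < ·)) (i k0 : Nat)
    (hk : k0 ≤ l.countP (· < i)) : pvAdvance l i k0 = l.countP (· < i) := by
  have hcl : l.countP (· < i) ≤ l.length := List.countP_le_length
  generalize hm : l.length - k0 = m
  induction m generalizing k0 with
  | zero =>
    rw [pvAdvance, dif_neg (by omega)]
    omega
  | succ m ih =>
    rw [pvAdvance]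
    rcases Nat.lt_or_ge k0 l.length with h1 | h1
    · rw [dif_pos h1]
      by_cases h2 : l[k0] < i
      · rw [if_pos h2]
        have hk' : k0 < l.countP (· < i) := (pvSorted_countP_lt l hs i k0 h1).mpr h2
        exact ih (k0 + 1) hk' (by omega)
      · rw [if_neg h2]
        have : ¬ (k0 < l.countP (· < i)) := fun hc =>
          h2 ((pvSorted_countP_lt l hs i k0 h1).mp hc)
        omega
    · rw [dif_neg (by omega)]
      omega

-- find on the suffix vs. the occurrence list: no occurrence at or after i
lemma pvOcc_count_all (s kw : List Char) (i : Nat) (_hi : i ≤ s.length)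
    (h : PySem.Chars.find (s.drop i) kw = -1) :
    (pvOcc s kw).countP (· < i) = (pvOcc s kw).length := by
  have hninf : ¬ kw <:+: s.drop i := (PySem.Chars.find_eq_neg_one_iff _ _).mp h
  rw [List.countP_eq_length]
  intro p hp
  rw [pvOcc_mem] at hp
  simp only [decide_eq_true_eq]
  by_contra hpi
  apply hninf
  rw [← PySem.Chars.isIn_iff_infix, ← PySem.Chars.exists_prefix_drop_iff_isIn]
  refine ⟨p - i, ?_⟩
  rw [List.drop_drop]
  have : i + (p - i) = p := by omega
  rw [this]
  exact hp.2

-- find on the suffix vs. the occurrence list: the first occurrence at or after i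
lemma pvOcc_count_get (s kw : List Char) (i : Nat) (hi : i ≤ s.length)
    (h : 0 ≤ PySem.Chars.find (s.drop i) kw) :
    ∃ hc : (pvOcc s kw).countP (· < i) < (pvOcc s kw).length,
      (pvOcc s kw)[(pvOcc s kw).countP (· < i)]
        = i + (PySem.Chars.find (s.drop i) kw).toNat := by
  set r : Int := PySem.Chars.find (s.drop i) kw with hrdef
  obtain ⟨hpre, hmin⟩ := PySem.Chars.find_spec (s := s.drop i) (sub := kw) h
  have hrle : r ≤ ((s.drop i).length : Int) := PySem.Chars.find_le_length _ _
  rw [List.length_drop] at hrle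
  set p : Nat := i + r.toNat with hpd
  have hpmem : p ∈ pvOcc s kw := by
    rw [pvOcc_mem]
    refine ⟨by omega, ?_⟩
    rw [List.drop_drop] at hpre
    exact hpre
  obtain ⟨jp, hjp, hjpeq⟩ := List.mem_iff_getElem.mp hpmem
  have hsorted := pvOcc_sorted s kw
  set O : List Nat := pvOcc s kw
  set c : Nat := O.countP (· < i) with hcd
  have hjpge : ¬ ((O[jp]) < i) := by rw [hjpeq]; omega
  have hjc : c ≤ jp := by
    by_contra hc
    exact hjpge ((pvSorted_countP_lt O hsorted i jp hjp).mp (by omega))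
  have hclt : c < O.length := lt_of_le_of_lt hjc hjp
  refine ⟨hclt, ?_⟩
  have hOc_ge : ¬ (O[c] < i) := fun hc =>
    absurd ((pvSorted_countP_lt O hsorted i c hclt).mpr hc) (by omega)
  have hOle : O[c] ≤ O[jp] := by
    rcases Nat.lt_or_ge c jp with hlt | hge
    · exact le_of_lt (List.pairwise_iff_getElem.mp hsorted c jp hclt hjp hlt)
    · simp only [show c = jp from by omega, le_refl]
  have hOmem : O[c] ∈ O := List.getElem_mem hclt
  rw [pvOcc_mem] at hOmem
  by_contra hne
  have hOlt : O[c] < p := by rw [hjpeq] at hOle; omega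
  have hlt2 : O[c] - i < r.toNat := by omega
  have := hmin (O[c] - i) hlt2
  apply this
  rw [List.drop_drop]
  have he : i + (O[c] - i) = O[c] := by omega
  rw [he]
  exact hOmem.2

-- one pass of Source B's inner for-loop equals A's smallest-index fold on the suffix
lemma pvStep_spec (s : List Char) (i : Nat) (hi : i ≤ s.length) :
    ∀ (kws : List (List Char)) (ptrs : List Nat)
      (hf : List.Forall₂ (fun kw k => k ≤ (pvOcc s kw).countP (· < i)) kws ptrs)
      (c0 : Nat) (hc : i ≤ c0),
      pvStep i ((kws.map (pvOcc s)).zip ptrs) c0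
        = (kws.map (fun kw => (pvOcc s kw).countP (· < i)),
           i + (kws.foldl (fun sm kw =>
                 let idx := PySem.Chars.find (s.drop i) kw
                 if 0 < idx ∧ idx < sm then idx else sm) ((c0 - i : Nat) : Int)).toNat) := by
  intro kws ptrs hf
  induction hf with
  | nil =>
    intro c0 hc
    simp only [List.map_nil, List.zip_nil_left, pvStep, List.foldl_nil]
    congr 1
    simp only [Int.toNat_natCast]
    omega
  | @cons kw k0 kws' ptrs' hk htail ih =>
    intro c0 hc
    simp only [List.map_cons, List.zip_cons_cons, List.foldl_cons, pvStep]
    rw [pvAdvance_eq _ (pvOcc_sorted s kw) i k0 hk]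
    rcases eq_or_lt_of_le (PySem.Chars.neg_one_le_find (s.drop i) kw) with hneg | hpos
    · -- the keyword does not occur at or after i
      have hfull : (pvOcc s kw).countP (· < i) = (pvOcc s kw).length :=
        pvOcc_count_all s kw i hi hneg.symm
      rw [dif_neg (by omega)]
      rw [ih c0 hc]
      have hA : (if 0 < PySem.Chars.find (s.drop i) kw ∧
          PySem.Chars.find (s.drop i) kw < ((c0 - i : Nat) : Int)
          then PySem.Chars.find (s.drop i) kw else ((c0 - i : Nat) : Int))
          = ((c0 - i : Nat) : Int) := by
        rw [if_neg]
        intro hcontra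
        omega
      rw [hA]
    · -- the keyword has a first occurrence at or after i
      have h0 : 0 ≤ PySem.Chars.find (s.drop i) kw := by omega
      obtain ⟨hclt, hOc⟩ := pvOcc_count_get s kw i hi h0
      rw [dif_pos hclt, hOc]
      by_cases hcond : 0 < PySem.Chars.find (s.drop i) kw ∧
          PySem.Chars.find (s.drop i) kw < ((c0 - i : Nat) : Int)
      · rw [if_pos (by omega), if_pos hcond]
        rw [ih (i + (PySem.Chars.find (s.drop i) kw).toNat) (by omega)]
        have hcast : ((i + (PySem.Chars.find (s.drop i) kw).toNat - i : Nat) : Int)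
            = PySem.Chars.find (s.drop i) kw := by omega
        rw [hcast]
      · rw [if_neg (by omega), if_neg hcond]
        rw [ih c0 hc]

-- the fold never increases its accumulator
lemma pvFindSmallest_fold_le (t : List Char) (kws : List (List Char)) (c : Int) :
    kws.foldl (fun sm kw =>
        let idx := PySem.Chars.find t kw
        if 0 < idx ∧ idx < sm then idx else sm) c ≤ c := by
  induction kws generalizing c with
  | nil => exact le_refl c
  | cons kw rest ih =>
    simp only [List.foldl_cons]
    refine le_trans (ih _) ?_
    split_ifs with h
    · exact le_of_lt h.2
    · exact le_refl c

-- the main loop from index i is A's recursion on the suffix from i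
lemma pvLoop_eq (s : List Char) (kws : List (List Char)) :
    ∀ (i : Nat) (hi : i ≤ s.length) (ptrs : List Nat)
      (hf : List.Forall₂ (fun kw k => k ≤ (pvOcc s kw).countP (· < i)) kws ptrs),
      pvLoop s (kws.map (pvOcc s)) ptrs i = splitRecChars (s.drop i) kws := by
  suffices main : ∀ (m i : Nat), s.length - i = m → i ≤ s.length → ∀ (ptrs : List Nat),
      List.Forall₂ (fun kw k => k ≤ (pvOcc s kw).countP (· < i)) kws ptrs →
      pvLoop s (kws.map (pvOcc s)) ptrs i = splitRecChars (s.drop i) kws by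
    exact fun i hi ptrs hf => main _ i rfl hi ptrs hf
  intro m
  induction m using Nat.strong_induction_on with
  | _ m ihm =>
  intro i hmi hi ptrs hf
  rw [pvLoop, splitRecChars]
  rw [pvStep_spec s i hi kws ptrs hf s.length hi]
  have hsm_eq : kws.foldl (fun sm kw =>
        let idx := PySem.Chars.find (s.drop i) kw
        if 0 < idx ∧ idx < sm then idx else sm) ((s.length - i : Nat) : Int)
      = pvFindSmallest (s.drop i) kws := by
    rw [pvFindSmallest, List.length_drop]
  rw [hsm_eq]
  set sm : Int := pvFindSmallest (s.drop i) kws with hsmdef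
  have hsm_cases := pvFindSmallest_pos (s.drop i) kws
  rw [List.length_drop, ← hsmdef] at hsm_cases
  have hsm0 : 0 ≤ sm := by omega
  have hsmle : sm ≤ ((s.length - i : Nat) : Int) := by
    have := pvFindSmallest_fold_le (s.drop i) kws ((s.length - i : Nat) : Int)
    rw [hsm_eq] at this
    exact this
  have hhead : PySem.List.slice s (some (i : Int)) (some ((i + sm.toNat : Nat) : Int))
      = PySem.List.slice (s.drop i) none (some sm) := by
    rw [PySem.List.slice_natCast, PySem.List.slice_to _ hsm0]
    congr 1
    omega
  have hpart2 : PySem.List.slice (s.drop i) (some sm) none = (s.drop i).drop sm.toNat :=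
    PySem.List.slice_from _ hsm0
  rw [hhead, hpart2]
  by_cases hbr : s.length ≤ i + sm.toNat
  · rw [if_pos hbr, if_neg (by simp only [List.length_drop]; omega)]
  · rw [if_neg hbr, if_pos (by simp only [List.length_drop]; omega)]
    have hdd : (s.drop i).drop sm.toNat = s.drop (i + sm.toNat) := List.drop_drop
    rw [hdd]
    have hsmpos : 0 < sm.toNat := by
      rcases hsm_cases with hp | hp
      · omega
      · omega
    rw [ihm (s.length - (i + sm.toNat)) (by omega) (i + sm.toNat) rfl (by omega) _ ?_]
    rw [List.forall₂_map_right_iff, List.forall₂_same]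
    intro kw _
    apply List.countP_mono_left
    intro x _ hx
    simp only [decide_eq_true_eq] at hx ⊢
    omega

theorem pv_main (s : List Char) (kws : List (List Char)) :
    splitRecChars s kws
      = pvLoop s (kws.map (fun kw => pvFindAll s kw 0))
          (List.replicate (kws.map (fun kw => pvFindAll s kw 0)).length 0) 0 := by
  have hmap : kws.map (fun kw => pvFindAll s kw 0) = kws.map (pvOcc s) :=
    List.map_congr_left (fun kw _ => pvFindAll_zero s kw)
  rw [hmap, List.length_map]
  have hrep : ∀ l : List (List Char),
      List.Forall₂ (fun kw k => k ≤ (pvOcc s kw).countP (· < 0)) l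
        (List.replicate l.length 0) := by
    intro l
    induction l with
    | nil => simp
    | cons kw rest ihr =>
      simp only [List.length_cons, List.replicate_succ]
      exact List.Forall₂.cons (Nat.zero_le _) ihr
  rw [pvLoop_eq s kws 0 (Nat.zero_le _) _ (hrep kws)]
  rw [List.drop_zero]

-- ===== VERDICT (by name: the statement is the Claim_ definition above) =====
theorem split_recursively_spec : Claim_equal_split_recursively := by
  intro full_text keywords _
  unfold Spec_split_recursively split_recursively split_recursively_alt
  rw [pv_main]
  simp only [List.map_map]
  rfl
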